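-- pv_equiv track=rewrite | github.com/eagledot/malhar | malhar/fuzzydatabase.py | _augment_data
-- ===== SOURCE A (Python) =====
-- def _augment_data(data:str) -> str:
--     # secret sauce !
--
--     FREQUENCY = "etaonrishdlfcmugypwbvkjxzq"
--     sample_dict = {}
--     for i, character in enumerate(FREQUENCY):
--         sample_dict[character] = FREQUENCY[len(FREQUENCY) -1 -i]
--
--     random_string = "this is {}-{}-{} destined to be a value, otherwise would not have enough variation to begin with in the first place."
--
--     for d in data:
--         if d == "{" or d == "}":
--             continue
--         random_string = random_string.replace(d,"*")
--
--     new_data = ""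
--     for d in data:
--         if d in sample_dict:
--             new_data += sample_dict[d]
--         else:
--             new_data += d
--
--     return random_string.format(new_data, new_data, new_data )
-- ===== SOURCE B (Python) =====
-- def _augment_data(data: str) -> str:
--     # One pass over the template with a membership set instead of len(data)
--     # full-string .replace scans; mapping built as dict(zip(...)).
--     FREQUENCY = "etaonrishdlfcmugypwbvkjxzq"
--     mapping = dict(zip(FREQUENCY, reversed(FREQUENCY)))
--
--     template = "this is {}-{}-{} destined to be a value, otherwise would not have enough variation to begin with in the first place."
--
--     chars = set(data) - {"{", "}"}
--     masked = "".join("*" if c in chars else c for c in template)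
--
--     new_data = "".join(mapping.get(c, c) for c in data)
--
--     return masked.format(new_data, new_data, new_data)
-- ===== Notes on version B (the rewrite author's own statement) =====
-- stated objective: faster
-- what changed: Masks the template in one pass using a set of data's non-brace characters instead of len(data) successive full-template .replace scans, and builds new_data via dict(zip(FREQUENCY, reversed(FREQUENCY))) lookups.
import Mathlib
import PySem

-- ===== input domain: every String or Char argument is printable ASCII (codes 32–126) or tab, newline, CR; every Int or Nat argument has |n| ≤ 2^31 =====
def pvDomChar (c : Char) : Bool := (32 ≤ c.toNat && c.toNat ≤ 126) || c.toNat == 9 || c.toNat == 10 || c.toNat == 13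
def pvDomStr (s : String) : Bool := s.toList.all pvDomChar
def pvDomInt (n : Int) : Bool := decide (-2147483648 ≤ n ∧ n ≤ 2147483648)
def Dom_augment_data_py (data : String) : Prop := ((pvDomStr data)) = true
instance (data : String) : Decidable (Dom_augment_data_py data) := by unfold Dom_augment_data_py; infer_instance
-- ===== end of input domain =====

-- B masks the template in ONE pass using a set of data's non-brace characters instead of
-- len(data) full-template .replace scans, and builds new_data via dict(zip(...)) lookups.

def pvFreq : List Char := "etaonrishdlfcmugypwbvkjxzq".toList

def pvTemplate : String := "this is {}-{}-{} destined to be a value, otherwise would not have enough variation to begin with in the first place."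

-- ===== PORT A =====
def augment_data_py (data : String) : String :=
  let sample_dict : PySem.Dict Char Char :=
    (PySem.List.enumerate pvFreq).foldl
      (fun d p =>
        -- FREQUENCY[len(FREQUENCY) - 1 - i]: the index is always in range, so '?' is never used
        d.insert p.2 ((PySem.List.pyGet? pvFreq ((pvFreq.length : Int) - 1 - p.1)).getD '?'))
      PySem.Dict.empty
  let random_string : String :=
    data.toList.foldl
      (fun rs d =>
        if d = '{' ∨ d = '}' then rs
        else PySem.Str.replace rs (String.ofList [d]) "*")
      pvTemplate
  let new_data : String :=
    data.toList.foldl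
      (fun nd d =>
        match sample_dict.get? d with      -- 'if d in sample_dict: … sample_dict[d] …'
        | some v => nd ++ String.ofList [v]
        | none   => nd ++ String.ofList [d])
      ""
  -- .format(new_data, new_data, new_data): exact here — the template's braces occur only as the
  -- three "{}" placeholders, the loop never touches braces, and all three arguments are equal,
  -- so formatting is replacing every "{}" with new_data.
  PySem.Str.replace random_string "{}" new_data

-- ===== PORT B =====
def augment_data_py_alt (data : String) : String :=
  let mapping : List (Char × Char) := pvFreq.zip pvFreq.reverse
  let chars : PySem.Set Char :=
    PySem.Set.ofList (data.toList.filter (fun c => decide (c ≠ '{' ∧ c ≠ '}')))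
  let masked : String :=
    String.ofList (pvTemplate.toList.map
      (fun c => if PySem.Set.contains chars c then '*' else c))
  let new_data : String :=
    String.ofList (data.toList.map (fun c => (mapping.lookup c).getD c))
  -- .format with three equal arguments, same note as in port A
  PySem.Str.replace masked "{}" new_data

-- ===== PRECONDITION & SPEC =====
def Spec_augment_data_py (data : String) (out : String) : Prop := out = augment_data_py_alt data
instance (data : String) (out : String) : Decidable (Spec_augment_data_py data out) := by unfold Spec_augment_data_py; infer_instance

-- ===== CLAIM (what is proved, stated in full; the proofs are below) =====
def Claim_equal_augment_data_py : Prop := ∀ (data : String), Dom_augment_data_py data → Spec_augment_data_py data (augment_data_py data)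

-- ===== LEMMAS AND PROOFS =====

/-- replace one char `d` by `'*'`. -/
def maskC (d c : Char) : Char := if c = d then '*' else c

/-- replace every char of `ds` by `'*'`. -/
def maskAll (ds : List Char) (c : Char) : Char := if c ∈ ds then '*' else c

theorem replace_go_single (d : Char) :
    ∀ (fuel : Nat) (l acc : List Char), l.length ≤ fuel →
      PySem.Chars.replace.go [d] ['*'] fuel l acc = acc.reverse ++ l.map (maskC d) := by
  intro fuel
  induction fuel with
  | zero => intro l acc h; simp at h; simp [h, PySem.Chars.replace.go]
  | succ n ih =>
    intro l acc h
    cases l with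
    | nil => simp [PySem.Chars.replace.go]
    | cons c t =>
      simp only [PySem.Chars.replace.go, List.isPrefixOf, List.map]
      by_cases hc : c = d
      · simp [hc, maskC, ih t _ (by simpa using h)]
      · simp [hc, (by simpa [eq_comm] using hc : ¬ d = c), maskC,
          ih t _ (by simpa using h)]

theorem replace_single (d : Char) (s : String) :
    (PySem.Str.replace s (String.ofList [d]) "*").toList = s.toList.map (maskC d) := by
  simp only [PySem.Str.toList_replace, String.toList_ofList, PySem.Chars.replace]
  simpa using replace_go_single d s.toList.length s.toList [] le_rfl

theorem skip_fold_eq_filter_fold {α : Type} (f : α → Char → α) :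
    ∀ (l : List Char) (a : α),
      l.foldl (fun x d => if d = '{' ∨ d = '}' then x else f x d) a
        = (l.filter (fun c => decide (c ≠ '{' ∧ c ≠ '}'))).foldl f a := by
  intro l
  induction l with
  | nil => intro a; rfl
  | cons c t ih =>
    intro a
    by_cases hc : c = '{' ∨ c = '}'
    · rcases hc with h | h <;> simp [List.filter, h, ih]
    · rw [not_or] at hc
      simp [List.filter, hc.1, hc.2, ih]

theorem fold_replace_eq_fold_map :
    ∀ (l : List Char) (s : String),
      (l.foldl (fun rs d => PySem.Str.replace rs (String.ofList [d]) "*") s).toList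
        = l.foldl (fun t d => t.map (maskC d)) s.toList := by
  intro l
  induction l with
  | nil => intro s; rfl
  | cons c t ih =>
    intro s
    simp only [List.foldl]
    rw [ih, ← replace_single]

theorem maskAll_maskC (ds : List Char) (d c : Char) :
    maskAll ds (maskC d c) = maskAll (d :: ds) c := by
  by_cases hc : c = d
  · simp [maskC, maskAll, hc]
  · simp [maskC, maskAll, hc]

theorem fold_map_eq_map_maskAll :
    ∀ (ds t : List Char),
      ds.foldl (fun t d => t.map (maskC d)) t = t.map (maskAll ds) := by
  intro ds
  induction ds with
  | nil =>
    intro t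
    rw [show maskAll [] = id from funext fun c => by simp [maskAll]]
    simp
  | cons d ds ih =>
    intro t
    simp only [List.foldl]
    rw [ih, List.map_map]
    exact List.map_congr_left (fun c _ => maskAll_maskC ds d c)

theorem dict_mk_get?_eq_lookup :
    ∀ (l : List (Char × Char)) (c : Char), (PySem.Dict.mk l).get? c = l.lookup c := by
  intro l
  induction l with
  | nil => intro c; rfl
  | cons p t ih =>
    intro c
    cases p with
    | mk k v =>
      by_cases hk : k = c
      · simp [PySem.Dict.get?, List.lookup, List.find?, hk]
      · have h1 : (k == c) = false := by simp [hk]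
        have h2 : (c == k) = false := by simp [Ne.symm hk]
        simp only [PySem.Dict.get?, List.lookup, List.find?, h1, h2]
        exact ih c

theorem sample_dict_eq :
    (PySem.List.enumerate pvFreq).foldl
      (fun d p =>
        d.insert p.2 ((PySem.List.pyGet? pvFreq ((pvFreq.length : Int) - 1 - p.1)).getD '?'))
      PySem.Dict.empty
    = PySem.Dict.mk (pvFreq.zip pvFreq.reverse) := by
  decide

theorem fold_append_eq_map (g : Char → Char) :
    ∀ (l : List Char) (s : String),
      (l.foldl (fun nd d => nd ++ String.ofList [g d]) s).toList = s.toList ++ l.map g := by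
  intro l
  induction l with
  | nil => intro s; simp
  | cons c t ih =>
    intro s
    simp only [List.foldl, List.map]
    rw [ih]
    simp

theorem augment_data_py_spec' (data : String) :
    augment_data_py data = augment_data_py_alt data := by
  unfold augment_data_py augment_data_py_alt
  apply String.toList_inj.mp
  have hmask :
      (data.toList.foldl
        (fun rs d =>
          if d = '{' ∨ d = '}' then rs
          else PySem.Str.replace rs (String.ofList [d]) "*") pvTemplate).toList
      = (String.ofList (pvTemplate.toList.map
          (fun c =>
            if PySem.Set.contains
                (PySem.Set.ofList (data.toList.filter (fun c => decide (c ≠ '{' ∧ c ≠ '}')))) c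
            then '*' else c))).toList := by
    rw [skip_fold_eq_filter_fold, fold_replace_eq_fold_map, fold_map_eq_map_maskAll,
      String.toList_ofList]
    apply List.map_congr_left
    intro c _
    simp [maskAll, PySem.Set.contains, PySem.Set.mem_ofList]
  have hnew :
      (data.toList.foldl
        (fun nd d =>
          match (PySem.Dict.mk (pvFreq.zip pvFreq.reverse)).get? d with
          | some v => nd ++ String.ofList [v]
          | none   => nd ++ String.ofList [d]) "").toList
      = (String.ofList (data.toList.map
          (fun c => ((pvFreq.zip pvFreq.reverse).lookup c).getD c))).toList := by
    have hstep : ∀ (nd : String) (d : Char),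
        (match (PySem.Dict.mk (pvFreq.zip pvFreq.reverse)).get? d with
         | some v => nd ++ String.ofList [v]
         | none   => nd ++ String.ofList [d])
        = nd ++ String.ofList [((pvFreq.zip pvFreq.reverse).lookup d).getD d] := by
      intro nd d
      rw [dict_mk_get?_eq_lookup]
      cases (pvFreq.zip pvFreq.reverse).lookup d <;> rfl
    simp only [hstep]
    rw [fold_append_eq_map]
    simp
  simp only [sample_dict_eq, PySem.Str.toList_replace]
  rw [hmask, hnew]

-- ===== VERDICT (by name: the statement is the Claim_ definition above) =====
theorem augment_data_py_spec : Claim_equal_augment_data_py := by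
  intro data _
  unfold Spec_augment_data_py
  exact augment_data_py_spec' data
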